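-- pv_equiv track=rewrite | github.com/jgrou/ProjectEuler | MultiplesWithSmallDigits.py | SmallDigits
-- ===== SOURCE A (Python) =====
-- def SmallDigits(curr_value, max_length, curr_length):
--     if max_length == curr_length:
--         yield curr_value
--         return
--     if curr_length == 0:
--         for start_digit in range(1,3):
--             yield from SmallDigits(start_digit, max_length, curr_length+1)
--     else:
--         for digit in range(3):
--             new_value = 10*curr_value + digit
--             yield from SmallDigits(new_value, max_length, curr_length+1)
-- ===== SOURCE B (Python) =====
-- def SmallDigits(curr_value, max_length, curr_length):
--     n = max_length - curr_length
--     if n < 0: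
--         raise ValueError("curr_length exceeds max_length")
--     if n == 0:
--         yield curr_value
--         return
--     if curr_length == 0:
--         frontier = [1, 2]
--         n -= 1
--     else:
--         frontier = [curr_value]
--     for _ in range(n):
--         frontier = [10 * v + d for v in frontier for d in range(3)]
--     yield from frontier
-- ===== Notes on version B (the rewrite author's own statement) =====
-- stated objective: alternative
-- what changed: Replaced A's depth-first recursion (yield-from tree walk) by an iterative breadth-first level expansion: a frontier list of partial values is expanded n times with a comprehension, then yielded; since all results lie at the same depth, the order is identical.
-- outside the precondition, e.g. on SmallDigits(5, 1, -1): A returns [1, 2, 1, 2, 1, 2], B returns [500, 501, 502, 510, 511, 512, 520, 521, 522]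
import Mathlib
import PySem

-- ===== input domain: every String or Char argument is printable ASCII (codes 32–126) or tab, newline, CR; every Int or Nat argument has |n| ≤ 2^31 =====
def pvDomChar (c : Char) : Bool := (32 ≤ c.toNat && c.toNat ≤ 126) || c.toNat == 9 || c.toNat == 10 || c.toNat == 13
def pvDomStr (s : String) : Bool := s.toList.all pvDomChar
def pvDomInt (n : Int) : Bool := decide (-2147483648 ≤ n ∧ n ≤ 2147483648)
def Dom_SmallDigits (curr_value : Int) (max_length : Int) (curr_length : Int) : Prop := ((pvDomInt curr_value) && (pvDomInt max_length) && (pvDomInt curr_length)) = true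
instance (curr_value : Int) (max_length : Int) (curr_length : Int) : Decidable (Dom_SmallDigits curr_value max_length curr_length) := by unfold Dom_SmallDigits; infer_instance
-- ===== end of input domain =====

-- B replaces A's depth-first recursion with an iterative level-by-level frontier expansion
-- (same values, same order, same exponential cost): an alternative decomposition, not a speedup.


-- ===== PORT A =====
-- A is a recursive generator; the port collects its yields as a list.  Under Pre_ the recursion
-- depth is exactly max_length - curr_length (A raises RecursionError when curr_length > max_length),
-- so the fuel (max_length - curr_length).toNat makes the literal recursion structural; the fuel-0
-- fallback [] is unreachable under Pre_.
def SmallDigitsA : Nat → Int → Int → Int → List Int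
  | fuel, curr_value, max_length, curr_length =>
    if max_length = curr_length then [curr_value]
    else
      match fuel with
      | 0 => []
      | f + 1 =>
        if curr_length = 0 then
          -- for start_digit in range(1,3): yield from SmallDigits(start_digit, max_length, curr_length+1)
          ([1, 2] : List Int).flatMap (fun start_digit =>
            SmallDigitsA f start_digit max_length (curr_length + 1))
        else
          -- for digit in range(3): new_value = 10*curr_value + digit; yield from …
          ([0, 1, 2] : List Int).flatMap (fun digit =>
            SmallDigitsA f (10 * curr_value + digit) max_length (curr_length + 1))

def SmallDigits (curr_value : Int) (max_length : Int) (curr_length : Int) : List Int :=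
  SmallDigitsA (max_length - curr_length).toNat curr_value max_length curr_length

-- ===== PORT B =====
-- the loop body: frontier = [10*v + d for v in frontier for d in range(3)]
def pvStep (frontier : List Int) : List Int :=
  frontier.flatMap (fun v => [10 * v + 0, 10 * v + 1, 10 * v + 2])

-- for _ in range(n): frontier = pvStep frontier   (range of a negative int is empty, hence toNat)
def pvExpand : Nat → List Int → List Int
  | 0, frontier => frontier
  | k + 1, frontier => pvExpand k (pvStep frontier)

def SmallDigits_alt (curr_value : Int) (max_length : Int) (curr_length : Int) : List Int :=
  let n := max_length - curr_length
  if n < 0 then []   -- raise ValueError (outside Pre_, where A raises RecursionError)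
  else if n = 0 then [curr_value]
  else if curr_length = 0 then pvExpand (n - 1).toNat [1, 2]   -- frontier = [1,2]; n -= 1
  else pvExpand n.toNat [curr_value]                           -- frontier = [curr_value]

-- ===== PRECONDITION & SPEC =====
-- Pre_ excludes curr_length > max_length, on which A recurses forever (RecursionError), and the
-- unspecified corner curr_length < 0 < max_length, on which A's curr_length==0 test fires
-- mid-recursion and accidentally discards the accumulated value (returning repeated copies of the
-- depth-0 enumeration) while B extends curr_value with small digits — both values are accidental
-- extensions of the generator to a negative length, and neither is the specified one.
def Pre_SmallDigits (curr_value : Int) (max_length : Int) (curr_length : Int) : Prop :=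
  curr_length ≤ max_length ∧ ¬ (curr_length < 0 ∧ 0 < max_length)
instance (curr_value : Int) (max_length : Int) (curr_length : Int) : Decidable (Pre_SmallDigits curr_value max_length curr_length) := by unfold Pre_SmallDigits; infer_instance

def pvWitness_SmallDigits : Int × Int × Int := (0, 3, 0)

def Spec_SmallDigits (curr_value : Int) (max_length : Int) (curr_length : Int) (out : List Int) : Prop := out = SmallDigits_alt curr_value max_length curr_length
instance (curr_value : Int) (max_length : Int) (curr_length : Int) (out : List Int) : Decidable (Spec_SmallDigits curr_value max_length curr_length out) := by unfold Spec_SmallDigits; infer_instance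

-- ===== CLAIM (what is proved, stated in full; the proofs are below) =====
def Claim_equal_SmallDigits : Prop := ∀ (curr_value : Int) (max_length : Int) (curr_length : Int), Dom_SmallDigits curr_value max_length curr_length → Pre_SmallDigits curr_value max_length curr_length → Spec_SmallDigits curr_value max_length curr_length (SmallDigits curr_value max_length curr_length)

-- ===== LEMMAS AND PROOFS =====

theorem SDa_succ_ne (f : Nat) (cv ml cl : Int) (hne : ml ≠ cl) (h0 : cl ≠ 0) :
    SmallDigitsA (f + 1) cv ml cl
      = SmallDigitsA f (10 * cv) ml (cl + 1) ++ SmallDigitsA f (10 * cv + 1) ml (cl + 1)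
          ++ SmallDigitsA f (10 * cv + 2) ml (cl + 1) := by
  conv_lhs => rw [SmallDigitsA]
  simp [hne, h0]

theorem SDa_succ_zero (f : Nat) (cv ml : Int) (hne : ml ≠ 0) :
    SmallDigitsA (f + 1) cv ml 0 = SmallDigitsA f 1 ml 1 ++ SmallDigitsA f 2 ml 1 := by
  conv_lhs => rw [SmallDigitsA]
  simp [hne]

theorem pvExpand_append (k : Nat) (xs ys : List Int) :
    pvExpand k (xs ++ ys) = pvExpand k xs ++ pvExpand k ys := by
  induction k generalizing xs ys with
  | zero => rfl
  | succ k ih => simp [pvExpand, pvStep, ih]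

theorem pvExpand_succ_single (k : Nat) (v : Int) :
    pvExpand (k + 1) [v]
      = pvExpand k [10 * v] ++ pvExpand k [10 * v + 1] ++ pvExpand k [10 * v + 2] := by
  have h : pvStep [v] = [10 * v] ++ [10 * v + 1] ++ [10 * v + 2] := by simp [pvStep]
  rw [pvExpand, h, pvExpand_append, pvExpand_append]

-- A's recursion, when it never passes through curr_length = 0, is exactly B's level expansion
-- of the single partial value.
theorem SmallDigitsA_expand (f : Nat) (cv ml cl : Int)
    (hml : ml = cl + f) (hz : ∀ j : Nat, j < f → cl + j ≠ 0) :
    SmallDigitsA f cv ml cl = pvExpand f [cv] := by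
  induction f generalizing cv cl with
  | zero => simp [SmallDigitsA, pvExpand, hml]
  | succ f ih =>
    have hne : ml ≠ cl := by omega
    have h0 : cl ≠ 0 := by simpa using hz 0 (Nat.succ_pos f)
    have hz' : ∀ j : Nat, j < f → cl + 1 + j ≠ 0 := by
      intro j hj
      have := hz (j + 1) (by omega)
      push_cast at this ⊢
      omega
    rw [SDa_succ_ne f cv ml cl hne h0,
      ih _ _ (by omega) hz', ih _ _ (by omega) hz', ih _ _ (by omega) hz',
      pvExpand_succ_single]

-- ===== VERDICT (by name: the statement is the Claim_ definition above) =====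
theorem SmallDigits_spec : Claim_equal_SmallDigits := by
  intro cv ml cl _ hpre
  obtain ⟨hle, hnd⟩ := hpre
  rw [not_and_or, not_lt, not_lt] at hnd
  unfold Spec_SmallDigits SmallDigits SmallDigits_alt
  rw [if_neg (show ¬ ml - cl < 0 by omega)]
  by_cases heq : ml - cl = 0
  · have : ml = cl := by omega
    subst this
    simp [SmallDigitsA]
  · simp only [if_neg heq]
    have hlt : cl < ml := by omega
    by_cases h0 : cl = 0
    · -- curr_length = 0: A restarts from digits 1,2; B seeds the frontier with [1,2]
      subst h0
      rw [if_pos rfl]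
      obtain ⟨f, hf⟩ : ∃ f : Nat, (ml : Int) = f + 1 := ⟨(ml - 1).toNat, by omega⟩
      have hfuel : (ml - (0:Int)).toNat = f + 1 := by omega
      rw [hfuel, SDa_succ_zero f cv ml (by omega),
        SmallDigitsA_expand f 1 ml 1 (by omega) (fun j hj => by omega),
        SmallDigitsA_expand f 2 ml 1 (by omega) (fun j hj => by omega)]
      have h1 : (ml - 0 - 1).toNat = f := by omega
      rw [h1, show ([1, 2] : List Int) = [1] ++ [2] from rfl, pvExpand_append]
    · -- curr_length ≠ 0 (and not curr_length < 0 < max_length): no depth-0 reset occurs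
      rw [if_neg h0]
      have hz : ∀ j : Nat, j < (ml - cl).toNat → cl + j ≠ 0 := by
        intro j hj
        rcases lt_or_gt_of_ne h0 with hneg | hpos
        · have : ml ≤ 0 := by rcases hnd with h | h <;> omega
          omega
        · omega
      exact SmallDigitsA_expand (ml - cl).toNat cv ml cl (by omega) hz
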